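-- pv_equiv track=rewrite | github.com/Arvo-AI/aurora | server/services/discovery/inference/node_lookup.py | find_node_by_arn
-- ===== SOURCE A (Python) =====
-- def extract_name_from_arn(arn):
--     """Extract the resource name from an AWS ARN.
--
--     ARN format: arn:aws:service:region:account:resource-type/resource-name
--     or           arn:aws:service:region:account:resource-name
--
--     Returns the last meaningful segment, or None if the ARN is invalid.
--     """
--     if not arn:
--         return None
--     parts = arn.split(":")
--     if len(parts) < 6:
--         return None
--     resource_part = parts[-1]
--     if "/" in resource_part:
--         return resource_part.split("/")[-1]
--     return resource_part
--
-- def find_node_by_name(name, graph_nodes):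
--     """Find a graph node whose name matches (case-insensitive).
--
--     Args:
--         name: The name to search for.
--         graph_nodes: List of graph node dicts.
--
--     Returns:
--         The node's canonical name string, or None if not found.
--     """
--     if not name:
--         return None
--     name_lower = name.lower()
--     for node in graph_nodes:
--         if (node.get("name") or "").lower() == name_lower:
--             return node["name"]
--     return None
--
-- def find_node_by_arn(arn, graph_nodes):
--     """Find a graph node whose cloud_resource_id matches the given ARN.
--
--     Tries an exact match on cloud_resource_id first, then falls back
--     to matching by the resource name extracted from the ARN.
--
--     Args:
--         arn: AWS ARN string to match.
--         graph_nodes: List of graph node dicts.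
--
--     Returns:
--         The node's canonical name string, or None if not found.
--     """
--     if not arn:
--         return None
--     arn_lower = arn.lower()
--     for node in graph_nodes:
--         cloud_id = (node.get("cloud_resource_id") or "").lower()
--         if cloud_id and cloud_id == arn_lower:
--             return node["name"]
--     return find_node_by_name(extract_name_from_arn(arn), graph_nodes)
-- ===== SOURCE B (Python) =====
-- def _extract_name(arn):
--     if not arn:
--         return None
--     parts = arn.split(":")
--     if len(parts) < 6:
--         return None
--     resource_part = parts[-1]
--     if "/" in resource_part:
--         return resource_part.split("/")[-1]
--     return resource_part
--
--
-- def find_node_by_arn(arn, graph_nodes):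
--     """Single pass: exact cloud_resource_id match returns immediately;
--     the first name-fallback match is only recorded, so a later exact
--     cloud-id match still wins; returned after the loop if no exact hit."""
--     if not arn:
--         return None
--     arn_lower = arn.lower()
--     target = _extract_name(arn)
--     target_lower = target.lower() if target else None
--     fallback = None
--     for node in graph_nodes:
--         cloud_id = (node.get("cloud_resource_id") or "").lower()
--         if cloud_id and cloud_id == arn_lower:
--             return node["name"]
--         if fallback is None and target_lower is not None \
--                 and (node.get("name") or "").lower() == target_lower:
--             fallback = node["name"]
--     return fallback
-- ===== Notes on version B (the rewrite author's own statement) =====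
-- stated objective: alternative
-- what changed: A scans the node list twice (one full pass for cloud_resource_id, then find_node_by_name does a second pass for the extracted name); B extracts and lowercases the target name up front and makes a single pass that returns on an exact cloud-id hit and merely records the first name match as a fallback.
import Mathlib
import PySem

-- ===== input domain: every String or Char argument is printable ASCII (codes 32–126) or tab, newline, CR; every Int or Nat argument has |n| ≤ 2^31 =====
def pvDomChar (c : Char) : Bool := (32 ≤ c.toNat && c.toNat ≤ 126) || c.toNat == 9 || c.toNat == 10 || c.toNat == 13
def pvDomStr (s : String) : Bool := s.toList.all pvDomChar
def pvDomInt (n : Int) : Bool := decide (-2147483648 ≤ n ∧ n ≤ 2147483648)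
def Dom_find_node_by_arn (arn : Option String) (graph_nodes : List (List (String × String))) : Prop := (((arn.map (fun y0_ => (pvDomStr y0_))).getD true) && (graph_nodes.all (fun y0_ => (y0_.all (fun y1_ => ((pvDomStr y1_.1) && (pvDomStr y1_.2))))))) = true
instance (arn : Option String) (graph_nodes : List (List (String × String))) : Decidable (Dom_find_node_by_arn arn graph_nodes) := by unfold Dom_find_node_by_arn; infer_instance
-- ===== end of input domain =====

-- B merges A's two sequential scans (cloud_resource_id pass, then name pass) into one pass that records the first name match as a fallback; same results, different decomposition.
-- Pre_ excludes only inputs where Python A raises KeyError (a node whose cloud_resource_id matches the ARN but has no "name" key); B raises there too.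


-- ===== PORT A =====
-- `(node.get(k) or "")`: missing key or empty value both give ""
def pvGetOrEmpty (node : List (String × String)) (k : String) : String :=
  ((PySem.Dict.mk node).get? k).getD ""

-- shared helper `extract_name_from_arn` (called by A directly and by Source B's `_extract_name`, same code)
def extract_name_from_arn (arn : String) : Option String :=
  if arn = "" then none
  else
    let parts := (PySem.Str.split? arn ":").getD []   -- sep ":" ≠ "": split? is some, exact
    if parts.length < 6 then none
    else
      let resource_part := parts.getLastD ""          -- parts[-1]; parts nonempty after split
      if PySem.Str.isIn "/" resource_part then
        some (((PySem.Str.split? resource_part "/").getD []).getLastD "")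
      else some resource_part

-- loop of find_node_by_name; node["name"] has a key whenever the guard holds (name_lower ≠ ""), so getD "" is exact
def pvNameLoop (name_lower : String) : List (List (String × String)) → Option String
  | [] => none
  | node :: rest =>
    if PySem.Str.lower (pvGetOrEmpty node "name") = name_lower then
      some (pvGetOrEmpty node "name")
    else pvNameLoop name_lower rest

def find_node_by_name (name : Option String) (graph_nodes : List (List (String × String))) : Option String :=
  match name with
  | none => none
  | some n => if n = "" then none else pvNameLoop (PySem.Str.lower n) graph_nodes

-- first loop of A; node["name"] can raise KeyError in Python — excluded by Pre_, getD "" there is harmless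
def pvCloudLoop (arn_lower : String) : List (List (String × String)) → Option String
  | [] => none
  | node :: rest =>
    let cloud_id := PySem.Str.lower (pvGetOrEmpty node "cloud_resource_id")
    if cloud_id ≠ "" ∧ cloud_id = arn_lower then
      some ((PySem.Dict.mk node).get? "name" |>.getD "")
    else pvCloudLoop arn_lower rest

def find_node_by_arn (arn : Option String) (graph_nodes : List (List (String × String))) : Option String :=
  match arn with
  | none => none
  | some a =>
    if a = "" then none
    else
      match pvCloudLoop (PySem.Str.lower a) graph_nodes with
      | some r => some r
      | none => find_node_by_name (extract_name_from_arn a) graph_nodes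

-- ===== PORT B =====
-- single pass of Source B: return on exact cloud-id hit, record first name match in `fallback`
def pvAltLoop (arn_lower : String) (target_lower : Option String) (fallback : Option String) :
    List (List (String × String)) → Option String
  | [] => fallback
  | node :: rest =>
    let cloud_id := PySem.Str.lower (pvGetOrEmpty node "cloud_resource_id")
    if cloud_id ≠ "" ∧ cloud_id = arn_lower then
      some ((PySem.Dict.mk node).get? "name" |>.getD "")   -- node["name"]; KeyError outside Pre_
    else
      let fallback' :=
        match fallback, target_lower with
        | none, some t =>
          if PySem.Str.lower (pvGetOrEmpty node "name") = t then
            some (pvGetOrEmpty node "name")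
          else none
        | _, _ => fallback
      pvAltLoop arn_lower target_lower fallback' rest

def find_node_by_arn_alt (arn : Option String) (graph_nodes : List (List (String × String))) : Option String :=
  match arn with
  | none => none
  | some a =>
    if a = "" then none
    else
      let target := extract_name_from_arn a
      let target_lower : Option String :=
        match target with
        | some t => if t = "" then none else some (PySem.Str.lower t)
        | none => none
      pvAltLoop (PySem.Str.lower a) target_lower none graph_nodes

-- ===== PRECONDITION & SPEC =====
-- Pre_ excludes exactly the inputs where Python A raises KeyError: a node whose non-empty
-- lowercased cloud_resource_id equals the lowercased ARN but which has no "name" key.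
-- (B raises the same KeyError there.)
def Pre_find_node_by_arn (arn : Option String) (graph_nodes : List (List (String × String))) : Prop :=
  ∀ node ∈ graph_nodes, ∀ a, arn = some a →
    (PySem.Str.lower (((PySem.Dict.mk node).get? "cloud_resource_id").getD "") ≠ "" ∧
     PySem.Str.lower (((PySem.Dict.mk node).get? "cloud_resource_id").getD "") = PySem.Str.lower a) →
    ((PySem.Dict.mk node).get? "name").isSome = true
instance (arn : Option String) (graph_nodes : List (List (String × String))) : Decidable (Pre_find_node_by_arn arn graph_nodes) := by unfold Pre_find_node_by_arn; infer_instance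

def pvWitness_find_node_by_arn : Option String × (List (List (String × String))) :=
  (some "a", [[("cloud_resource_id", "A"), ("name", "n")]])

def Spec_find_node_by_arn (arn : Option String) (graph_nodes : List (List (String × String))) (out : Option String) : Prop := out = find_node_by_arn_alt arn graph_nodes
instance (arn : Option String) (graph_nodes : List (List (String × String))) (out : Option String) : Decidable (Spec_find_node_by_arn arn graph_nodes out) := by unfold Spec_find_node_by_arn; infer_instance

-- ===== CLAIM (what is proved, stated in full; the proofs are below) =====
def Claim_equal_find_node_by_arn : Prop := ∀ (arn : Option String) (graph_nodes : List (List (String × String))), Dom_find_node_by_arn arn graph_nodes → Pre_find_node_by_arn arn graph_nodes → Spec_find_node_by_arn arn graph_nodes (find_node_by_arn arn graph_nodes)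

-- ===== LEMMAS AND PROOFS =====
-- `pvAltLoop` with fallback tracking equals A's two sequential scans.
lemma pvAltLoop_eq (al : String) (tl fb : Option String) (ns : List (List (String × String))) :
    pvAltLoop al tl fb ns =
      match pvCloudLoop al ns with
      | some r => some r
      | none =>
        match fb with
        | some f => some f
        | none => match tl with
                  | some t => pvNameLoop t ns
                  | none => none := by
  induction ns generalizing fb with
  | nil => cases fb with
    | some f => simp [pvAltLoop, pvCloudLoop]
    | none => cases tl <;> simp [pvAltLoop, pvCloudLoop, pvNameLoop]
  | cons node rest ih =>
    by_cases hc : PySem.Str.lower (pvGetOrEmpty node "cloud_resource_id") ≠ ""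
        ∧ PySem.Str.lower (pvGetOrEmpty node "cloud_resource_id") = al
    · have hal : al ≠ "" := hc.2 ▸ hc.1
      simp [pvAltLoop, pvCloudLoop, hc, hal]
    · cases fb with
      | some f => simp [pvAltLoop, pvCloudLoop, hc, ih]
      | none =>
        cases tl with
        | none => simp [pvAltLoop, pvCloudLoop, hc, ih]
        | some t =>
          by_cases hn : PySem.Str.lower (pvGetOrEmpty node "name") = t
          · simp [pvAltLoop, pvCloudLoop, pvNameLoop, hc, hn, ih]
          · simp [pvAltLoop, pvCloudLoop, pvNameLoop, hc, hn, ih]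

-- ===== VERDICT (by name: the statement is the Claim_ definition above) =====
theorem find_node_by_arn_spec : Claim_equal_find_node_by_arn := by
  intro arn graph_nodes _ _
  unfold Spec_find_node_by_arn find_node_by_arn find_node_by_arn_alt
  cases arn with
  | none => rfl
  | some a =>
    by_cases ha : a = ""
    · simp [ha]
    · simp only [ha, if_false]
      rw [pvAltLoop_eq]
      cases hcl : pvCloudLoop (PySem.Str.lower a) graph_nodes with
      | some r => simp
      | none =>
        simp only []
        cases hx : extract_name_from_arn a with
        | none => simp [find_node_by_name]
        | some t =>
          by_cases ht : t = ""
          · simp [find_node_by_name, ht]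
          · simp [find_node_by_name, ht]
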